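-- pv_equiv track=rewrite | github.com/jithsungh/resume_parser | src/core/resume_info_extractor.py | determine_primary_role
-- ===== SOURCE A (Python) =====
-- from typing import Dict, Any, List, Optional, Tuple
--
-- def determine_primary_role(experiences: List[Dict]) -> Optional[str]:
--     """
--     Determine the primary/current role
--     If all roles are same, return that. Otherwise return latest role.
--     """
--     if not experiences:
--         return None
--
--     roles = [exp.get('role') for exp in experiences if exp.get('role')]
--
--     if not roles:
--         return None
--
--     # If all roles are the same
--     unique_roles = list(set(roles))
--     if len(unique_roles) == 1:
--         return unique_roles[0]
--
--     # Return the latest (first in list assuming chronological order)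
--     return roles[0]
-- ===== SOURCE B (Python) =====
-- def determine_primary_role(experiences):
--     """Return the first truthy 'role' among experiences, else None."""
--     for exp in experiences:
--         role = exp.get('role')
--         if role:
--             return role
--     return None
-- ===== Notes on version B (the rewrite author's own statement) =====
-- stated objective: simpler
-- what changed: B replaces A's build-a-roles-list-then-dedup-via-set-then-branch computation with a single early-exit loop returning the first truthy role; no list or set is materialized.
import Mathlib
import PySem

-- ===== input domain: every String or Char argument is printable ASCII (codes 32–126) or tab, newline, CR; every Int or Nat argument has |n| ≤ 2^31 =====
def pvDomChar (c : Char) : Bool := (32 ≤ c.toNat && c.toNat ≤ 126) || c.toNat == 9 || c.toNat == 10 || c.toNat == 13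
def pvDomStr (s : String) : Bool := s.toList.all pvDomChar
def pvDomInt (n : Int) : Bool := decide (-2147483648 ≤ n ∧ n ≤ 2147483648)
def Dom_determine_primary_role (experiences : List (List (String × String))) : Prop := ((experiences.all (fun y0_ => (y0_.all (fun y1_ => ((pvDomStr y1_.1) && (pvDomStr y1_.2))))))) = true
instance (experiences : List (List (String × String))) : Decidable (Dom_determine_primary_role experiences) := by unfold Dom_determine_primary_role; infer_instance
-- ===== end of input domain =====

-- B replaces A's roles-list + set-dedup + branch with a single early-exit scan for the first truthy role (objective: simpler).

-- ===== PORT A =====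
-- exp.get('role') truthy ⇔ present and nonempty
def pvTruthyRole (exp : List (String × String)) : Option String :=
  match (PySem.Dict.mk exp).get? "role" with
  | some s => if s ≠ "" then some s else none
  | none => none

def determine_primary_role (experiences : List (List (String × String))) : Option String :=
  if experiences = [] then none
  else
    let roles := experiences.filterMap pvTruthyRole
    if roles = [] then none
    else
      let unique_roles : PySem.Set String := PySem.Set.ofList roles
      if unique_roles.length = 1 then
        -- unique_roles[0]; the guard makes the index safe, so pyGet? returns some here
        PySem.List.pyGet? unique_roles 0
      else
        PySem.List.pyGet? roles 0

-- ===== PORT B =====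
def determine_primary_role_alt (experiences : List (List (String × String))) : Option String :=
  match experiences with
  | [] => none
  | exp :: rest =>
    match (PySem.Dict.mk exp).get? "role" with
    | some role => if role ≠ "" then some role else determine_primary_role_alt rest
    | none => determine_primary_role_alt rest

-- ===== PRECONDITION & SPEC =====
def Spec_determine_primary_role (experiences : List (List (String × String))) (out : Option String) : Prop := out = determine_primary_role_alt experiences
instance (experiences : List (List (String × String))) (out : Option String) : Decidable (Spec_determine_primary_role experiences out) := by unfold Spec_determine_primary_role; infer_instance

-- ===== CLAIM (what is proved, stated in full; the proofs are below) =====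
def Claim_equal_determine_primary_role : Prop := ∀ (experiences : List (List (String × String))), Dom_determine_primary_role experiences → Spec_determine_primary_role experiences (determine_primary_role experiences)

-- ===== LEMMAS AND PROOFS =====

-- folding Set.add over any nonempty accumulator preserves its head
lemma foldl_add_head (l : List String) (s : List String) (h : s ≠ []) :
    (l.foldl PySem.Set.add s).head? = s.head? ∧ l.foldl PySem.Set.add s ≠ [] := by
  induction l generalizing s with
  | nil => exact ⟨rfl, h⟩
  | cons x xs ih =>
    simp only [List.foldl]
    have hadd : (PySem.Set.add s x).head? = s.head? ∧ PySem.Set.add s x ≠ [] := by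
      unfold PySem.Set.add
      split
      · exact ⟨rfl, h⟩
      · constructor
        · cases s with
          | nil => exact absurd rfl h
          | cons a t => simp
        · simp [h]
    obtain ⟨h1, h2⟩ := ih (PySem.Set.add s x) hadd.2
    exact ⟨h1.trans hadd.1, h2⟩

lemma ofList_head (r : String) (l : List String) :
    (PySem.Set.ofList (r :: l)).head? = some r := by
  have := foldl_add_head l [r] (by simp)
  simpa [PySem.Set.ofList, PySem.Set.add, List.foldl] using this.1

-- A's branch structure as a function of the roles list alone
def pvCore (roles : List String) : Option String :=
  if roles = [] then none
  else if (PySem.Set.ofList roles).length = 1 then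
    PySem.List.pyGet? (PySem.Set.ofList roles) 0
  else PySem.List.pyGet? roles 0

lemma core_cons (r : String) (l : List String) : pvCore (r :: l) = some r := by
  unfold pvCore
  simp only [if_neg (List.cons_ne_nil r l)]
  split
  · rw [PySem.List.pyGet?_zero, ← List.head?_eq_getElem?, ofList_head]
  · rw [PySem.List.pyGet?_zero_cons]

lemma A_eq_core (experiences : List (List (String × String))) :
    determine_primary_role experiences = pvCore (experiences.filterMap pvTruthyRole) := by
  unfold determine_primary_role pvCore
  cases experiences with
  | nil => simp
  | cons e r => simp only [if_neg (List.cons_ne_nil e r)]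

lemma alt_cons (exp : List (String × String)) (rest : List (List (String × String))) :
    determine_primary_role_alt (exp :: rest) =
      match pvTruthyRole exp with
      | some r => some r
      | none => determine_primary_role_alt rest := by
  rw [show determine_primary_role_alt (exp :: rest) =
      (match (PySem.Dict.mk exp).get? "role" with
       | some role => if role ≠ "" then some role else determine_primary_role_alt rest
       | none => determine_primary_role_alt rest) from rfl]
  unfold pvTruthyRole
  cases (PySem.Dict.mk exp).get? "role" with
  | none => rfl
  | some s => by_cases hs : s = "" <;> simp [hs]

lemma A_eq_alt (experiences : List (List (String × String))) :
    determine_primary_role experiences = determine_primary_role_alt experiences := by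
  rw [A_eq_core]
  induction experiences with
  | nil => rfl
  | cons exp rest ih =>
    rw [List.filterMap_cons, alt_cons]
    cases pvTruthyRole exp with
    | none => exact ih
    | some r => exact core_cons r _

-- ===== VERDICT (by name: the statement is the Claim_ definition above) =====
theorem determine_primary_role_spec : Claim_equal_determine_primary_role := by
  intro experiences _
  exact A_eq_alt experiences
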